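-- pv_equiv track=rewrite | github.com/trinhvanminh/NLPs | Vietnamese word tokenizer/addition/v2.py | word_case_list
-- ===== SOURCE A (Python) =====
-- def word_case_list(words):
--     l = len(words)
--     word_case = []
--     for idx in range(l):
--         word_case_child = []
--         for i in range(1, min(4, l - idx)):
--             t = ''
--             for j in range(i):
--                 t += words[j + idx] + ' '
--             t += words[i + idx]
--             word_case_child.append(t)
--         word_case.append(word_case_child)
--
--     return word_case
-- ===== SOURCE B (Python) =====
-- def word_case_list(words):
--     result = []
--     l = len(words)
--     for idx in range(l):
--         child = []
--         t = words[idx]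
--         for i in range(1, min(4, l - idx)):
--             t = t + ' ' + words[idx + i]
--             child.append(t)
--         result.append(child)
--     return result
-- ===== Notes on version B (the rewrite author's own statement) =====
-- stated objective: faster
-- what changed: B maintains a running n-gram accumulator per position, extending it with one word per step, instead of A's innermost loop that rebuilds each joined string from scratch for every i; the innermost loop disappears.
import Mathlib
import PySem

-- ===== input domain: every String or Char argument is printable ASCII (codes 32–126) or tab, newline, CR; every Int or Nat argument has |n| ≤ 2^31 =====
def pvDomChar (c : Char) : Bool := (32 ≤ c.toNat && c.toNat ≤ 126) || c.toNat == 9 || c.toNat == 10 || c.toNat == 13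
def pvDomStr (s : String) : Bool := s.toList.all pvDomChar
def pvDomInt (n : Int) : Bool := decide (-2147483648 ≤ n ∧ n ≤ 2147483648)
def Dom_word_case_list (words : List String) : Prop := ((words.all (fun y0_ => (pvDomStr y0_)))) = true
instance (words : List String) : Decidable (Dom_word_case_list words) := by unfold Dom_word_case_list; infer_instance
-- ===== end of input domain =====

-- ===== PORT A =====
-- One honest line: B maintains a running n-gram accumulator per position instead of
-- rebuilding each joined string with an inner loop; alternative decomposition, same results.
def word_case_list (words : List String) : List (List String) :=
  (PySem.List.pyRange 0 (words.length : Int) 1).foldl (fun word_case idx =>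
    let word_case_child :=
      (PySem.List.pyRange 1 (min 4 ((words.length : Int) - idx)) 1).foldl (fun word_case_child i =>
        let t :=
          (PySem.List.pyRange 0 i 1).foldl (fun t j =>
            t ++ PySem.List.pyGetD words (j + idx) "" ++ " ") ""
        let t := t ++ PySem.List.pyGetD words (i + idx) ""
        word_case_child ++ [t]) []
    word_case ++ [word_case_child]) []

-- ===== PORT B =====
def word_case_list_alt (words : List String) : List (List String) :=
  (PySem.List.pyRange 0 (words.length : Int) 1).foldl (fun result idx =>
    let t := PySem.List.pyGetD words idx ""
    let p :=
      (PySem.List.pyRange 1 (min 4 ((words.length : Int) - idx)) 1).foldl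
        (fun (p : List String × String) i =>
          let t := p.2 ++ " " ++ PySem.List.pyGetD words (idx + i) ""
          (p.1 ++ [t], t)) ([], t)
    result ++ [p.1]) []

-- ===== PRECONDITION & SPEC =====
def Spec_word_case_list (words : List String) (out : List (List String)) : Prop := out = word_case_list_alt words
instance (words : List String) (out : List (List String)) : Decidable (Spec_word_case_list words out) := by unfold Spec_word_case_list; infer_instance

-- ===== CLAIM (what is proved, stated in full; the proofs are below) =====
def Claim_equal_word_case_list : Prop := ∀ (words : List String), Dom_word_case_list words → Spec_word_case_list words (word_case_list words)

-- ===== LEMMAS AND PROOFS =====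

-- per-position equality of the two inner computations
lemma inner_eq (words : List String) (idx : Int) :
    (PySem.List.pyRange 1 (min 4 ((words.length : Int) - idx)) 1).foldl (fun word_case_child i =>
        let t :=
          (PySem.List.pyRange 0 i 1).foldl (fun t j =>
            t ++ PySem.List.pyGetD words (j + idx) "" ++ " ") ""
        let t := t ++ PySem.List.pyGetD words (i + idx) ""
        word_case_child ++ [t]) []
    =
    ((PySem.List.pyRange 1 (min 4 ((words.length : Int) - idx)) 1).foldl
        (fun (p : List String × String) i =>
          let t := p.2 ++ " " ++ PySem.List.pyGetD words (idx + i) ""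
          (p.1 ++ [t], t)) ([], PySem.List.pyGetD words idx "")).1 := by
  rcases le_or_gt (min 4 ((words.length : Int) - idx)) 1 with h | h
  · rw [PySem.List.pyRange_one_eq_nil h]
    simp
  · have hm : min 4 ((words.length : Int) - idx) = 2 ∨
        min 4 ((words.length : Int) - idx) = 3 ∨
        min 4 ((words.length : Int) - idx) = 4 := by omega
    rcases hm with h' | h' | h' <;> rw [h'] <;>
      simp [List.foldl,
            show PySem.List.pyRange 1 2 1 = [1] from by decide,
            show PySem.List.pyRange 1 3 1 = [1, 2] from by decide,
            show PySem.List.pyRange 1 4 1 = [1, 2, 3] from by decide,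
            show PySem.List.pyRange 0 1 1 = [0] from by decide,
            show PySem.List.pyRange 0 2 1 = [0, 1] from by decide,
            show PySem.List.pyRange 0 3 1 = [0, 1, 2] from by decide,
            Int.add_comm]

-- ===== VERDICT (by name: the statement is the Claim_ definition above) =====
theorem word_case_list_spec : Claim_equal_word_case_list := by
  intro words _
  unfold Spec_word_case_list word_case_list word_case_list_alt
  refine PySem.List.foldl_congr_mem _ _ _ _ ?_
  intro acc idx _
  simp only
  rw [inner_eq]
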